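-- pv_equiv track=rewrite | github.com/pjaehyun/TIL | PS/leetcode/2607.Make K-Subarray Sums Equal.py | makeSubKSumEqual
-- ===== SOURCE A (Python) =====
-- from typing import List
--
-- def makeSubKSumEqual(arr: List[int], k: int) -> int:
--     n = len(arr)
--
--     def gcd(x, y):
--       value = 0
--
--       for i in range(1, y + 1):
--         if x % i == 0 and y % i == 0:
--             value = i
--       return value
--
--     gcd = gcd(n, k)
--     answer = 0
--     for i in range(gcd):
--       temp = sorted([arr[x] for x in range(i, n, gcd)])
--       mid = temp[len(temp) // 2]
--       answer += sum(abs(mid - temp[j]) for j in range(len(temp)))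
--     return answer
-- ===== SOURCE B (Python) =====
-- from typing import List
--
-- def makeSubKSumEqual(arr: List[int], k: int) -> int:
--     n = len(arr)
--
--     def _gcd(x, y):
--         while y:
--             x, y = y, x % y
--         return x
--
--     g = _gcd(n, k)
--     answer = 0
--     for i in range(g):
--         grp = sorted([arr[x] for x in range(i, n, g)])
--         lo, hi = 0, len(grp) - 1
--         while lo < hi:
--             answer += grp[hi] - grp[lo]
--             lo += 1
--             hi -= 1
--     return answer
-- ===== Notes on version B (the rewrite author's own statement) =====
-- stated objective: alternative
-- what changed: Replaces A's trial-division loop over range(1, k+1) for gcd(n,k) with the Euclidean algorithm, and replaces A's median-based per-group cost (pick temp[len//2], sum absolute differences over the whole group) with a two-pointer sweep accumulating temp[hi]-temp[lo] from both ends inward; it trades the median/abs-sum aggregation for pair differences.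
import Mathlib
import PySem

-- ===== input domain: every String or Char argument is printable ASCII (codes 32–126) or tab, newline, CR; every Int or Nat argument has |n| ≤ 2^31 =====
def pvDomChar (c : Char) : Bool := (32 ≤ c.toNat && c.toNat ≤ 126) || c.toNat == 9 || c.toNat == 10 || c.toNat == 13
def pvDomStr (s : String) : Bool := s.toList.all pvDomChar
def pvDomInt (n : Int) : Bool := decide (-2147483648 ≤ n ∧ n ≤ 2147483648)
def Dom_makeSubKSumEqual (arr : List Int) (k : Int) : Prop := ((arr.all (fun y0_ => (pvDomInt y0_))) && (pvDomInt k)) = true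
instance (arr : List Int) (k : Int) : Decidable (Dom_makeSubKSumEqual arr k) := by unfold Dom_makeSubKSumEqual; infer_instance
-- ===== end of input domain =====

-- B replaces A's trial-division gcd by the Euclidean algorithm and A's median-based
-- per-group cost (pick temp[len//2], sum absolute differences) by a two-pointer sweep
-- accumulating temp[hi]-temp[lo]; same return value on every input A returns on.

-- ===== PORT A =====
def makeSubKSumEqual (arr : List Int) (k : Int) : Int :=
  let n : Int := (arr.length : Int)
  -- gcd = gcd(n, k) computed by trial division over range(1, k+1), keeping the last common divisor
  let gcd : Int := (PySem.List.pyRange 1 (k + 1) 1).foldl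
    (fun value i => if PySem.Int.mod n i == 0 && PySem.Int.mod k i == 0 then i else value) 0
  (PySem.List.pyRange 0 gcd 1).foldl
    (fun answer i =>
      let temp := PySem.List.sorted ((PySem.List.pyRange i n gcd).map
        (fun x => PySem.List.pyGetD arr x 0)) (fun v => v)
      let mid := PySem.List.pyGetD temp (PySem.Int.floordiv ((temp.length : Int)) 2) 0
      answer + ((PySem.List.pyRange 0 ((temp.length : Int)) 1).map
        (fun j => |mid - PySem.List.pyGetD temp j 0|)).sum) 0

-- ===== PORT B =====
-- while y: x, y = y, x % y   (fuel = |y|+1 suffices: |x % y| < |y| each iteration)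
def pvEuclidGo : Nat -> Int -> Int -> Int
  | 0, x, _ => x
  | fuel + 1, x, y => if ¬ y = 0 then pvEuclidGo fuel y (PySem.Int.mod x y) else x

def pvEuclid (x y : Int) : Int := pvEuclidGo (y.natAbs + 1) x y

-- while lo < hi: answer += grp[hi] - grp[lo]; lo += 1; hi -= 1   (fuel = (hi-lo)+1 suffices)
def pvPairGo : Nat -> List Int -> Int -> Int -> Int -> Int
  | 0, _, answer, _, _ => answer
  | fuel + 1, grp, answer, lo, hi =>
    if lo < hi then
      pvPairGo fuel grp (answer + PySem.List.pyGetD grp hi 0 - PySem.List.pyGetD grp lo 0) (lo + 1) (hi - 1)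
    else answer

def pvPairLoop (grp : List Int) (answer lo hi : Int) : Int :=
  pvPairGo ((hi - lo).toNat + 1) grp answer lo hi

def makeSubKSumEqual_alt (arr : List Int) (k : Int) : Int :=
  let n : Int := (arr.length : Int)
  let g : Int := pvEuclid n k
  (PySem.List.pyRange 0 g 1).foldl
    (fun answer i =>
      let grp := PySem.List.sorted ((PySem.List.pyRange i n g).map
        (fun x => PySem.List.pyGetD arr x 0)) (fun v => v)
      pvPairLoop grp answer 0 ((grp.length : Int) - 1)) 0

-- ===== PRECONDITION & SPEC =====
-- Pre_ excludes only the inputs on which A raises: an empty arr with k ≥ 1 (gcd(0,k)=k groups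
-- are empty, so temp[len(temp)//2] raises IndexError).  A is total everywhere else.
def Pre_makeSubKSumEqual (arr : List Int) (k : Int) : Prop := arr ≠ [] ∨ k ≤ 0
instance (arr : List Int) (k : Int) : Decidable (Pre_makeSubKSumEqual arr k) := by
  unfold Pre_makeSubKSumEqual; infer_instance

def pvWitness_makeSubKSumEqual : List Int × Int := ([1, 3, 2, 4], 2)

def Spec_makeSubKSumEqual (arr : List Int) (k : Int) (out : Int) : Prop := out = makeSubKSumEqual_alt arr k
instance (arr : List Int) (k : Int) (out : Int) : Decidable (Spec_makeSubKSumEqual arr k out) := by unfold Spec_makeSubKSumEqual; infer_instance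

-- ===== CLAIM (what is proved, stated in full; the proofs are below) =====
def Claim_equal_makeSubKSumEqual : Prop := ∀ (arr : List Int) (k : Int), Dom_makeSubKSumEqual arr k → Pre_makeSubKSumEqual arr k → Spec_makeSubKSumEqual arr k (makeSubKSumEqual arr k)

-- ===== LEMMAS AND PROOFS =====

-- enough fuel: iteration strictly shrinks |y|
theorem pvModAbs_lt (x y : Int) (h : ¬ y = 0) : (PySem.Int.mod x y).natAbs < y.natAbs := by
  rcases lt_or_gt_of_ne h with hneg | hpos
  · have := PySem.Int.mod_neg_bounds x hneg
    omega
  · have h1 := PySem.Int.mod_nonneg x hpos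
    have h2 := PySem.Int.mod_lt x hpos
    omega

-- Euclid on nonnegative inputs: nonnegative, a common divisor, divided by every common divisor
theorem pvEuclidGo_spec : ∀ (f : Nat) (y x : Int), y.natAbs < f → 0 ≤ y → 0 ≤ x →
    0 ≤ pvEuclidGo f x y ∧ pvEuclidGo f x y ∣ x ∧ pvEuclidGo f x y ∣ y ∧
      ∀ c : Int, c ∣ x → c ∣ y → c ∣ pvEuclidGo f x y := by
  intro f
  induction f with
  | zero => intro y x h; omega
  | succ f ih =>
    intro y x hf hy hx
    by_cases h0 : y = 0
    · subst h0
      simp only [pvEuclidGo, not_true, if_false]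
      exact ⟨hx, dvd_rfl, dvd_zero x, fun c hcx _ => hcx⟩
    · have hypos : 0 < y := lt_of_le_of_ne hy (Ne.symm h0)
      have hmod : PySem.Int.mod x y = x % y := PySem.Int.mod_eq_emod_of_pos hypos
      have habs : (PySem.Int.mod x y).natAbs < y.natAbs := pvModAbs_lt x y h0
      have hrec := ih (PySem.Int.mod x y) y (by omega)
        (by rw [hmod]; exact Int.emod_nonneg x h0) hy
      obtain ⟨r0, r1, r2, r3⟩ := hrec
      simp only [pvEuclidGo, h0, if_true, not_false_iff]
      refine ⟨r0, ?_, r1, ?_⟩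
      · -- divides x : x = y * (x/y) + x % y
        have hd : pvEuclidGo f y (PySem.Int.mod x y) ∣ y * (x / y) + x % y :=
          dvd_add (Dvd.dvd.mul_right r1 _) (hmod ▸ r2)
        rwa [Int.mul_ediv_add_emod] at hd
      · intro c hcx hcy
        refine r3 c hcy ?_
        rw [hmod, Int.emod_def]
        exact dvd_sub hcx (Dvd.dvd.mul_right hcy _)

theorem pvEuclidGo_neg : ∀ (f : Nat) (y x : Int), y.natAbs < f → y < 0 → pvEuclidGo f x y < 0 := by
  intro f
  induction f with
  | zero => intro y x h; omega
  | succ f ih =>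
    intro y x hf hy
    have h0 : ¬ y = 0 := by omega
    simp only [pvEuclidGo, h0, not_false_iff, if_true]
    have hb := PySem.Int.mod_neg_bounds x hy
    by_cases hm : PySem.Int.mod x y = 0
    · rw [hm]
      obtain ⟨f, rfl⟩ : ∃ f', f = f' + 1 := ⟨f - 1, by omega⟩
      simp [pvEuclidGo, hy]
    · exact ih (PySem.Int.mod x y) y (by have := pvModAbs_lt x y h0; omega) (by omega)

theorem pvGcdLoop_eq (n k : Int) (hn : 0 ≤ n) (hk : 1 ≤ k) :
    (PySem.List.pyRange 1 (k + 1) 1).foldl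
      (fun value i => if PySem.Int.mod n i == 0 && PySem.Int.mod k i == 0 then i else value) 0
    = pvEuclid n k := by
  have inv : ∀ j : Nat,
      (((PySem.List.pyRange 1 ((j:Int) + 1) 1).foldl
        (fun value i => if PySem.Int.mod n i == 0 && PySem.Int.mod k i == 0 then i else value) 0 = 0)
       ∨ (1 ≤ (PySem.List.pyRange 1 ((j:Int) + 1) 1).foldl
        (fun value i => if PySem.Int.mod n i == 0 && PySem.Int.mod k i == 0 then i else value) 0
          ∧ (PySem.List.pyRange 1 ((j:Int) + 1) 1).foldl
        (fun value i => if PySem.Int.mod n i == 0 && PySem.Int.mod k i == 0 then i else value) 0 ∣ n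
          ∧ (PySem.List.pyRange 1 ((j:Int) + 1) 1).foldl
        (fun value i => if PySem.Int.mod n i == 0 && PySem.Int.mod k i == 0 then i else value) 0 ∣ k))
      ∧ ∀ i : Int, 1 ≤ i → i ≤ (j:Int) → i ∣ n → i ∣ k →
          i ≤ (PySem.List.pyRange 1 ((j:Int) + 1) 1).foldl
        (fun value i => if PySem.Int.mod n i == 0 && PySem.Int.mod k i == 0 then i else value) 0 := by
    intro j
    induction j with
    | zero =>
      rw [PySem.List.pyRange_one_eq_nil (by norm_num)]
      exact ⟨Or.inl rfl, by intro i h1 h2; omega⟩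
    | succ j ih =>
      have hsplit : PySem.List.pyRange 1 ((j:Int) + 1 + 1) 1
          = PySem.List.pyRange 1 ((j:Int) + 1) 1 ++ [(j:Int) + 1] := by
        exact PySem.List.pyRange_one_succ_right (by omega)
      push_cast
      push_cast at hsplit ih
      rw [hsplit, List.foldl_append]
      obtain ⟨ih1, ih2⟩ := ih
      simp only [List.foldl_cons, List.foldl_nil]
      by_cases hc : ((j:Int) + 1) ∣ n ∧ ((j:Int) + 1) ∣ k
      · rw [if_pos (by
          simp only [Bool.and_eq_true, beq_iff_eq, PySem.Int.mod_eq_zero_iff_dvd]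
          exact hc)]
        refine ⟨Or.inr ⟨by omega, hc.1, hc.2⟩, ?_⟩
        intro i h1 h2 h3 h4
        omega
      · rw [if_neg (by
          simp only [Bool.and_eq_true, beq_iff_eq, PySem.Int.mod_eq_zero_iff_dvd]
          exact hc)]
        refine ⟨ih1, ?_⟩
        intro i h1 h2 h3 h4
        rcases lt_or_eq_of_le h2 with h | h
        · exact ih2 i h1 (by omega) h3 h4
        · exact absurd (h ▸ ⟨h3, h4⟩) hc
  have hg := pvEuclidGo_spec (k.natAbs + 1) k n (by omega) (by omega) hn
  obtain ⟨g0, g1, g2, g3⟩ := hg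
  have hgeq : pvEuclidGo (k.natAbs + 1) n k = pvEuclid n k := rfl
  rw [hgeq] at g0 g1 g2 g3
  have hk0 : (pvEuclid n k) ≠ 0 := by
    intro h
    rw [h, zero_dvd_iff] at g2
    omega
  have hgle : pvEuclid n k ≤ k := Int.le_of_dvd (by omega) g2
  have hpos : 1 ≤ pvEuclid n k := by omega
  have inv' := inv k.toNat
  rw [Int.toNat_of_nonneg (by omega)] at inv'
  obtain ⟨h1, h2⟩ := inv'
  have hge : pvEuclid n k ≤ (PySem.List.pyRange 1 (k + 1) 1).foldl
      (fun value i => if PySem.Int.mod n i == 0 && PySem.Int.mod k i == 0 then i else value) 0 := by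
    refine h2 _ hpos hgle g1 g2
  rcases h1 with h | ⟨hv1, hv2, hv3⟩
  · rw [h] at hge ⊢
    omega
  · have hdvd : (PySem.List.pyRange 1 (k + 1) 1).foldl
        (fun value i => if PySem.Int.mod n i == 0 && PySem.Int.mod k i == 0 then i else value) 0
        ∣ pvEuclid n k := g3 _ hv2 hv3
    have := Int.le_of_dvd (by omega) hdvd
    omega

theorem pvPairGo_fuel (grp : List Int) : ∀ (f : Nat), ∀ (g : Nat) (ans lo hi : Int),
    (hi - lo).toNat < f → (hi - lo).toNat < g →
    pvPairGo f grp ans lo hi = pvPairGo g grp ans lo hi := by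
  intro f
  induction f with
  | zero => intro g ans lo hi h; omega
  | succ f ih =>
    intro g ans lo hi hf hg
    obtain ⟨g', rfl⟩ : ∃ g', g = g' + 1 := ⟨g - 1, by omega⟩
    simp only [pvPairGo]
    by_cases hlt : lo < hi
    · rw [if_pos hlt, if_pos hlt]
      exact ih g' _ _ _ (by omega) (by omega)
    · rw [if_neg hlt, if_neg hlt]

-- getD index shift on a :: s ++ [b]

-- getD index shift on a :: s ++ [b]
theorem pvGetShift (s : List Int) (a b : Int) (j : Int) (h1 : 1 ≤ j) (h2 : j ≤ (s.length : Int)) :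
    PySem.List.pyGetD (a :: (s ++ [b])) j 0 = PySem.List.pyGetD s (j - 1) 0 := by
  rw [PySem.List.pyGetD_eq_getElem _ _ (by omega) (by simp; omega),
      PySem.List.pyGetD_eq_getElem _ _ (by omega) (by omega)]
  have hj : j.toNat = (j - 1).toNat + 1 := by omega
  have h3 : (a :: (s ++ [b]))[j.toNat]? = s[(j - 1).toNat]? := by
    rw [hj, List.getElem?_cons_succ, List.getElem?_append_left (by omega)]
  rw [List.getElem?_eq_getElem (by simp; omega), List.getElem?_eq_getElem (by omega)] at h3
  exact Option.some.inj h3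

theorem pvPairGo_shift (s : List Int) (a b : Int) : ∀ (f : Nat) (ans lo hi : Int),
    1 ≤ lo → hi ≤ (s.length : Int) →
    pvPairGo f (a :: (s ++ [b])) ans lo hi = pvPairGo f s ans (lo - 1) (hi - 1) := by
  intro f
  induction f with
  | zero => intro ans lo hi _ _; rfl
  | succ f ih =>
    intro ans lo hi hlo hhi
    simp only [pvPairGo]
    by_cases hlt : lo < hi
    · rw [if_pos hlt, if_pos (by omega : lo - 1 < hi - 1)]
      rw [pvGetShift s a b hi (by omega) hhi, pvGetShift s a b lo hlo (by omega)]
      have := ih (ans + PySem.List.pyGetD s (hi - 1) 0 - PySem.List.pyGetD s (lo - 1) 0)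
        (lo + 1) (hi - 1) (by omega) (by omega)
      rw [this]
      congr 1
      omega
    · rw [if_neg hlt, if_neg (by omega : ¬ (lo - 1 < hi - 1))]

theorem pvCore : ∀ (L : Nat) (t : List Int), t.length = L → t.Pairwise (· ≤ ·) → ∀ ans : Int,
    pvPairLoop t ans 0 ((t.length : Int) - 1)
      = ans + ((List.range t.length).map
          (fun j => |t.getD (t.length / 2) 0 - t.getD j 0|)).sum := by
  intro L
  induction L using Nat.strong_induction_on with
  | _ L ih =>
  intro t hL ht ans
  match t, hL with
  | [], hL => simp [pvPairLoop, pvPairGo]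
  | [x], hL => simp [pvPairLoop, pvPairGo]
  | (a :: y :: rest), hL =>
    have htne : (y :: rest) ≠ [] := by simp
    set s : List Int := (y :: rest).dropLast with hs
    set b : Int := (y :: rest).getLast htne with hb
    have hdec : (y :: rest) = s ++ [b] := (List.dropLast_append_getLast htne).symm
    set m : Nat := s.length with hm
    have hsorted_s : s.Pairwise (· ≤ ·) := by
      have h1 : (y :: rest).Pairwise (· ≤ ·) := (List.pairwise_cons.mp ht).2
      rw [hdec] at h1
      exact h1.sublist (List.sublist_append_left s [b])
    rw [show (a :: y :: rest) = a :: (s ++ [b]) by rw [← hdec]] at ht ⊢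
    have hLt : (a :: (s ++ [b])).length = m + 2 := by simp [hm]
    rw [hLt]
    -- values at the ends
    have hgb0 : ((s ++ [b]) : List Int).getD m 0 = b := by
      rw [List.getD_eq_getElem _ _ (by simp [hm]), List.getElem_concat_length]
      exact hm
    have hga : PySem.List.pyGetD (a :: (s ++ [b])) 0 0 = a := PySem.List.pyGetD_zero_cons ..
    have hgb : PySem.List.pyGetD (a :: (s ++ [b])) ((m : Int) + 1) 0 = b := by
      rw [show ((m : Int) + 1) = ((m + 1 : Nat) : Int) by push_cast; ring,
          PySem.List.pyGetD_natCast, List.getD_cons_succ, hgb0]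
    -- the median element c
    set c : Int := (a :: (s ++ [b])).getD ((m + 2) / 2) 0 with hc
    have hcc : c = ((s ++ [b]) : List Int).getD (m / 2) 0 := by
      rw [hc, show (m + 2) / 2 = m / 2 + 1 by omega, List.getD_cons_succ]
    have hcmem : c ∈ (s ++ [b]) := by
      rw [hcc, List.getD_eq_getElem _ _ (by simp [hm]; omega)]
      exact List.getElem_mem _
    have hac : a ≤ c := (List.pairwise_cons.mp ht).1 c hcmem
    have hptail := List.pairwise_iff_getElem.mp (List.pairwise_cons.mp ht).2
    have hcb : c ≤ b := by
      rcases Nat.eq_zero_or_pos m with h0 | hpos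
      · have hs0 : s = [] := List.length_eq_zero_iff.mp (by omega)
        rw [hcc, hs0]
        simp [h0]
      · have h2 : m / 2 < m := Nat.div_lt_self hpos (by norm_num)
        have h3 := hptail (m / 2) m (by simp [hm]; omega) (by simp [hm]) h2
        have hbb : ((s ++ [b]) : List Int)[m]'(by simp [hm]) = b :=
          (List.getD_eq_getElem (s ++ [b]) 0 (by simp [hm])).symm.trans hgb0
        rw [hcc, List.getD_eq_getElem _ _ (by simp [hm]; omega)]
        exact le_trans h3 (le_of_eq hbb)
    have hcs : m ≠ 0 → c = s.getD (m / 2) 0 := by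
      intro hm0
      rw [hcc, List.getD_append _ _ _ _ (by omega)]
    -- LHS chain
    have step1 : pvPairLoop (a :: (s ++ [b])) ans 0 (((m + 2 : Nat) : Int) - 1)
        = pvPairGo (m + 2) (a :: (s ++ [b])) ans 0 ((m : Int) + 1) := by
      unfold pvPairLoop
      rw [show (((m + 2 : Nat) : Int) - 1) = (m : Int) + 1 by push_cast; ring]
      congr 1
    have step2 : pvPairGo (m + 2) (a :: (s ++ [b])) ans 0 ((m : Int) + 1)
        = pvPairGo (m + 1) (a :: (s ++ [b])) (ans + b - a) 1 ((m : Int)) := by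
      rw [show m + 2 = (m + 1) + 1 from rfl]
      simp only [pvPairGo]
      rw [if_pos (by omega : (0 : Int) < (m : Int) + 1)]
      rw [hgb, hga]
      norm_num
    have step3 : pvPairGo (m + 1) (a :: (s ++ [b])) (ans + b - a) 1 ((m : Int))
        = pvPairGo (m + 1) s (ans + b - a) 0 ((m : Int) - 1) := by
      have := pvPairGo_shift s a b (m + 1) (ans + b - a) 1 ((m : Int)) (by omega) (by omega)
      simpa using this
    have step4 : pvPairGo (m + 1) s (ans + b - a) 0 ((m : Int) - 1)
        = pvPairLoop s (ans + b - a) 0 ((s.length : Int) - 1) := by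
      unfold pvPairLoop
      rw [← hm]
      exact pvPairGo_fuel s (m + 1) _ _ _ _ (by omega) (by omega)
    have hmL : m + 2 = L := by
      have h1 := hL
      simp only [List.length_cons] at h1
      have h2 : m = rest.length := by rw [hm, hs]; simp
      omega
    have step5 := ih m (by omega) s hm.symm hsorted_s (ans + b - a)
    rw [step1, step2, step3, step4, step5, ← hm]
    -- split the range sum
    rw [show m + 2 = (m + 1) + 1 from rfl, List.range_succ, List.map_append, List.sum_append,
        List.range_succ_eq_map, List.map_cons, List.sum_cons, List.map_map]
    simp only [List.map_singleton, List.sum_singleton, Function.comp_def]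
    have hf0 : (a :: (s ++ [b])).getD 0 0 = a := rfl
    have hfm : (a :: (s ++ [b])).getD (m + 1) 0 = b := by
      rw [List.getD_cons_succ, hgb0]
    rw [hf0, hfm]
    have hinner : ∀ j ∈ List.range m,
        |c - (a :: (s ++ [b])).getD (Nat.succ j) 0| = |s.getD (m / 2) 0 - s.getD j 0| := by
      intro j hj
      rw [List.mem_range] at hj
      rw [List.getD_cons_succ, List.getD_append _ _ _ _ (by omega),
          ← hcs (by omega)]
    rw [List.map_congr_left hinner]
    have habs1 : |c - a| = c - a := abs_of_nonneg (sub_nonneg.mpr hac)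
    have habs2 : |c - b| = b - c := by rw [abs_sub_comm]; exact abs_of_nonneg (sub_nonneg.mpr hcb)
    rw [habs1, habs2]
    ring

theorem pvStep_eq (l : List Int) (ans : Int) :
    (let temp := PySem.List.sorted l (fun v => v)
     ans + ((PySem.List.pyRange 0 ((temp.length : Int)) 1).map
        (fun j => |PySem.List.pyGetD temp (PySem.Int.floordiv ((temp.length : Int)) 2) 0
                    - PySem.List.pyGetD temp j 0|)).sum)
    = (let temp := PySem.List.sorted l (fun v => v)
       pvPairLoop temp ans 0 ((temp.length : Int) - 1)) := by
  set temp := PySem.List.sorted l (fun v => v) with htemp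
  show ans + _ = pvPairLoop temp ans 0 ((temp.length : Int) - 1)
  have hsorted : temp.Pairwise (· ≤ ·) := PySem.List.sorted_pairwise l (fun v => v)
  rw [pvCore temp.length temp rfl hsorted ans]
  congr 1
  have hfd : PySem.Int.floordiv ((temp.length : Int)) 2 = ((temp.length / 2 : Nat) : Int) := by
    rw [PySem.Int.floordiv_eq_ediv_of_pos (by norm_num)]
    exact_mod_cast Int.ofNat_ediv_ofNat
  rw [PySem.List.pyRange_zero_nat, List.map_map]
  refine congrArg List.sum (List.map_congr_left ?_)
  intro j hj
  simp only [Function.comp_apply, hfd, PySem.List.pyGetD_natCast]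

-- singleton ranges: range(i, n, n) = [i] for 0 ≤ i < n
theorem pvRange_step_self (i n : Int) (h0 : 0 ≤ i) (h1 : i < n) :
    PySem.List.pyRange i n n = [i] := by
  rw [PySem.List.pyRange_of_pos i n (by omega)]
  rw [if_pos h1]
  have hq : (n - i + n - 1) / n = 1 := by
    have h2 : n - i + n - 1 = (n - i - 1) + n * 1 := by ring
    rw [h2, Int.add_mul_ediv_left _ _ (by omega), Int.ediv_eq_zero_of_lt (by omega) (by omega)]
    ring
  rw [hq]
  simp

-- ===== VERDICT (by name: the statement is the Claim_ definition above) =====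
theorem makeSubKSumEqual_spec : Claim_equal_makeSubKSumEqual := by
  intro arr k _ _
  unfold Spec_makeSubKSumEqual
  simp only [makeSubKSumEqual, makeSubKSumEqual_alt]
  rcases lt_trichotomy k 0 with hk | hk | hk
  · -- k < 0 : both sides are 0
    rw [PySem.List.pyRange_one_eq_nil (by omega : k + 1 ≤ 1)]
    simp only [List.foldl_nil]
    rw [PySem.List.pyRange_one_eq_nil (le_refl (0 : Int))]
    have hneg : pvEuclid ((arr.length : Int)) k < 0 :=
      pvEuclidGo_neg (k.natAbs + 1) k ((arr.length : Int)) (by omega) hk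
    rw [PySem.List.pyRange_one_eq_nil (by omega : pvEuclid ((arr.length : Int)) k ≤ 0)]
    simp
  · -- k = 0 : A returns 0; B's groups are singletons, so every step is a no-op
    subst hk
    rw [PySem.List.pyRange_one_eq_nil (by norm_num : (0 : Int) + 1 ≤ 1)]
    simp only [List.foldl_nil]
    rw [PySem.List.pyRange_one_eq_nil (le_refl (0 : Int))]
    have he0 : pvEuclid ((arr.length : Int)) 0 = (arr.length : Int) := by
      simp [pvEuclid, pvEuclidGo]
    rw [he0]
    symm
    rw [PySem.List.foldl_congr_mem _ _ (fun (a : Int) (_ : Int) => a) 0 ?_]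
    · exact List.foldl_fixed _
    · intro acc i hi
      rw [PySem.List.mem_pyRange_one] at hi
      rw [pvRange_step_self i _ hi.1 hi.2]
      simp only [List.map_cons, List.map_nil]
      rw [PySem.List.sorted_eq_self_of_pairwise _ _
        (List.pairwise_singleton _ (PySem.List.pyGetD arr i 0))]
      simp [pvPairLoop, pvPairGo]
  · -- k ≥ 1 : equal gcds, then pointwise-equal fold steps
    rw [pvGcdLoop_eq ((arr.length : Int)) k (by omega) (by omega)]
    exact PySem.List.foldl_congr_mem _ _ _ _ (fun acc x _ => pvStep_eq _ acc)
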